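-- pv_equiv track=rewrite | github.com/mcorne/ti57 | app/models/generator.py | extract_last_comments
-- ===== SOURCE A (Python) =====
-- def extract_last_comments(lines):
--     comments = []
--     for line in reversed(lines):
--         if line and line[0] != "#":
--             break
--         comments.insert(0, line)
--         lines.pop()
--     return comments
-- ===== SOURCE B (Python) =====
-- def extract_last_comments(lines):
--     cut = 0
--     for idx, line in enumerate(lines):
--         if line and line[0] != "#":
--             cut = idx + 1
--     comments = lines[cut:]
--     del lines[cut:]
--     return comments
-- ===== Notes on version B (the rewrite author's own statement) =====
-- stated objective: alternative
-- what changed: Replaces A's backward pop/insert(0) loop with a single forward enumerate pass that records the index past the last non-comment line, then takes and deletes the trailing slice in bulk.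
import Mathlib
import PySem

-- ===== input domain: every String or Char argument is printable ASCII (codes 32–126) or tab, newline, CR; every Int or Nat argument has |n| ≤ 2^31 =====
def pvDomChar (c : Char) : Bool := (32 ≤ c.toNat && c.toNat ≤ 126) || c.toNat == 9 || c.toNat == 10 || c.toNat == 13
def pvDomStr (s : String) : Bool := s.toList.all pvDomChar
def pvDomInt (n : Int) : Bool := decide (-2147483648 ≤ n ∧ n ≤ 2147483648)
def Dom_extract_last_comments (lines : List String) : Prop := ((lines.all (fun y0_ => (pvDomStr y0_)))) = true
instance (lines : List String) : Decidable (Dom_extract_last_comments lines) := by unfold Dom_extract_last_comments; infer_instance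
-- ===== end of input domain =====

-- B replaces A's backward pop/insert(0) loop by a forward boundary scan plus a bulk slice.
-- Note: both Pythons mutate `lines` identically (removing the returned trailing comment
-- lines); the equivalence proved here is about the RETURN value.

-- ===== PORT A =====
-- loop `for line in reversed(lines)`: break when line is truthy and line[0] != "#",
-- else comments.insert(0, line) (which prepends, since we walk backwards)
def extractA_go : List String → List String → List String
  | [], comments => comments
  | line :: rest, comments =>
    if line ≠ "" ∧ line.toList.head? ≠ some '#' then comments
    else extractA_go rest (line :: comments)

def extract_last_comments (lines : List String) : List String :=
  extractA_go lines.reverse []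

-- ===== PORT B =====
def extract_last_comments_alt (lines : List String) : List String :=
  let cut : Int := (PySem.List.enumerate lines).foldl
    (fun c p => if p.2 ≠ "" ∧ p.2.toList.head? ≠ some '#' then p.1 + 1 else c) 0
  PySem.List.slice lines (some cut) none

-- ===== PRECONDITION & SPEC =====
def Spec_extract_last_comments (lines : List String) (out : List String) : Prop := out = extract_last_comments_alt lines
instance (lines : List String) (out : List String) : Decidable (Spec_extract_last_comments lines out) := by unfold Spec_extract_last_comments; infer_instance

-- ===== CLAIM (what is proved, stated in full; the proofs are below) =====
def Claim_equal_extract_last_comments : Prop := ∀ (lines : List String), Dom_extract_last_comments lines → Spec_extract_last_comments lines (extract_last_comments lines)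

-- ===== LEMMAS AND PROOFS =====

-- ===== VERDICT (by name: the statement is the Claim_ definition above) =====
-- `real l` : l is a non-comment line (truthy and not starting with '#')
def realLine (l : String) : Bool := decide (l ≠ "" ∧ l.toList.head? ≠ some '#')

theorem goA_eq (rs acc : List String) :
    extractA_go rs acc = (rs.takeWhile (fun l => !realLine l)).reverse ++ acc := by
  induction rs generalizing acc with
  | nil => simp [extractA_go]
  | cons l rest ih =>
    by_cases h : l ≠ "" ∧ l.toList.head? ≠ some '#'
    · simp [extractA_go, realLine, h]
    · have h' : l = "" ∨ l.toList.head? = some '#' := by tauto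
      simp [extractA_go, if_neg h, ih, realLine, h']

def cutF (lines : List String) : Int :=
  (PySem.List.enumerate lines).foldl
    (fun c p => if p.2 ≠ "" ∧ p.2.toList.head? ≠ some '#' then p.1 + 1 else c) 0

theorem cutF_concat (xs : List String) (x : String) :
    cutF (xs ++ [x]) = if realLine x then (xs.length : Int) + 1 else cutF xs := by
  unfold cutF
  rw [PySem.List.enumerate_append, List.foldl_append]
  simp [PySem.List.enumerate, realLine]

theorem cutF_bounds (xs : List String) : 0 ≤ cutF xs ∧ cutF xs ≤ xs.length := by
  induction xs using List.reverseRecOn with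
  | nil => simp [cutF]
  | append_singleton xs x ih =>
    have h := cutF_concat xs x
    rw [h]
    split_ifs <;> simp <;> omega

theorem alt_eq (lines : List String) :
    extract_last_comments_alt lines
      = (lines.reverse.takeWhile (fun l => !realLine l)).reverse := by
  show PySem.List.slice lines (some (cutF lines)) none = _
  induction lines using List.reverseRecOn with
  | nil => simp [cutF, PySem.List.slice]
  | append_singleton xs x ih =>
    rw [cutF_concat]
    by_cases hx : realLine x = true
    · rw [if_pos hx]
      have : ((xs.length : Int) + 1) = ((xs.length + 1 : Nat) : Int) := by push_cast; ring
      rw [this, PySem.List.slice_from_natCast]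
      simp [hx]
    · rw [if_neg hx]
      obtain ⟨h0, hle⟩ := cutF_bounds xs
      obtain ⟨n, hn⟩ : ∃ n : Nat, cutF xs = (n : Int) := ⟨(cutF xs).toNat, by omega⟩
      have hnle : n ≤ xs.length := by omega
      rw [hn, PySem.List.slice_from_natCast] at ih ⊢
      rw [List.drop_append_of_le_length hnle]
      simp [hx, ih]

theorem extract_last_comments_spec : Claim_equal_extract_last_comments := by
  intro lines _
  unfold Spec_extract_last_comments extract_last_comments
  rw [goA_eq, alt_eq, List.append_nil]
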